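-- pv_equiv track=rewrite | github.com/Sansthita-Dey/personal-knowledge-twin | retrieval/domain_assigner.py | assign_domains_to_chunks
-- ===== SOURCE A (Python) =====
-- def assign_domains_to_chunks(top_keywords_per_chunk, domain_keywords):
--
--     chunk_domains = []
--
--     for chunk_keywords in top_keywords_per_chunk:
--         domain_scores = {}
--
--         for domain, keywords in domain_keywords.items():
--
--             # FIX: ensure keywords is iterable
--             if not isinstance(keywords, (list, set, tuple)):
--                 continue
--
--             overlap = sum(1 for word in chunk_keywords if word in keywords)
--             domain_scores[domain] = overlap
--
--         # fallback if dictionary is empty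
--         if not domain_scores:
--             chunk_domains.append("general")
--             continue
--
--         best_domain = max(domain_scores, key=domain_scores.get)
--
--         # fallback if no overlap found
--         if domain_scores[best_domain] == 0:
--             best_domain = "general"
--
--         chunk_domains.append(best_domain)
--
--     return chunk_domains
-- ===== SOURCE B (Python) =====
-- def assign_domains_to_chunks(top_keywords_per_chunk, domain_keywords):
--     # Inverted index: keyword -> list of domains containing it (in domain order).
--     index = {}
--     valid_domains = []
--     for domain, keywords in domain_keywords.items():
--         # same non-iterable skip as the original
--         if not isinstance(keywords, (list, set, tuple)):
--             continue
--         valid_domains.append(domain)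
--         for word in dict.fromkeys(keywords):  # each distinct keyword once
--             index.setdefault(word, []).append(domain)
--
--     chunk_domains = []
--     for chunk_keywords in top_keywords_per_chunk:
--         if not valid_domains:
--             chunk_domains.append("general")
--             continue
--         domain_scores = dict.fromkeys(valid_domains, 0)
--         for word in chunk_keywords:
--             for domain in index.get(word, ()):
--                 domain_scores[domain] += 1
--         best_domain = max(domain_scores, key=domain_scores.get)
--         chunk_domains.append(best_domain if domain_scores[best_domain] > 0 else "general")
--     return chunk_domains
-- ===== Notes on version B (the rewrite author's own statement) =====
-- stated objective: alternative
-- what changed: Replaces A's per-chunk membership scan over every domain's keyword list with an inverted keyword-to-domains index built once, so each chunk is scored by counter increments from index lookups instead of rescanning all keyword lists.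
import Mathlib
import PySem

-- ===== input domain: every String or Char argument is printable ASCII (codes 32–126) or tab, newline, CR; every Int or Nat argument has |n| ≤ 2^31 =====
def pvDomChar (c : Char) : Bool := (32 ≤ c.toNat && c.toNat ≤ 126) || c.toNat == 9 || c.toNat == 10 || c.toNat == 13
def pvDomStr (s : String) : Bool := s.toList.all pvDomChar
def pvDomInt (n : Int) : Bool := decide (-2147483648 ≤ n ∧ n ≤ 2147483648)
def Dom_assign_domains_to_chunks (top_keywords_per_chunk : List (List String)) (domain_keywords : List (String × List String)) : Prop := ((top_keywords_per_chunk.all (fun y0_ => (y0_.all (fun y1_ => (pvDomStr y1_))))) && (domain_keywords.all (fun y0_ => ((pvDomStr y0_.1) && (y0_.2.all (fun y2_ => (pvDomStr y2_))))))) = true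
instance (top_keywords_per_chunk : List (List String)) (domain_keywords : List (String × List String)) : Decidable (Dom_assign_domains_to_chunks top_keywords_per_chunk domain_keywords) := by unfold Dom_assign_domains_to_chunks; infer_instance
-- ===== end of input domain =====

-- ===== PORT A =====
-- Header: B replaces the per-chunk scan over every domain's keyword list by an inverted
-- keyword->domains index built once (objective: alternative data structure; same results).
-- Port of A: per chunk, score every domain by membership scan, then max over the dict.
def assign_domains_to_chunks (top_keywords_per_chunk : List (List String)) (domain_keywords : List (String × List String)) : List String :=
  let d := PySem.Dict.ofList domain_keywords
  top_keywords_per_chunk.foldl (fun chunk_domains chunk_keywords =>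
    let domain_scores : PySem.Dict String Int :=
      d.items.foldl (fun s p =>
        s.insert p.1 (chunk_keywords.foldl (fun o w => if w ∈ p.2 then o + 1 else o) 0))
        PySem.Dict.empty
    if domain_scores.items.isEmpty then chunk_domains ++ ["general"]
    else
      match PySem.List.max? domain_scores.keys (fun k => domain_scores.getD k 0) with
      | none => chunk_domains ++ ["general"]  -- unreachable: guarded by the isEmpty check
      | some best =>
        if domain_scores.getD best 0 = 0 then chunk_domains ++ ["general"]
        else chunk_domains ++ [best]) []

-- ===== PORT B =====
-- Port of B: inverted index keyword -> domains; per chunk, counters over the valid domains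
-- bumped by index lookups. (The Python guard for non-iterable keyword values is vacuous
-- under the Lean type, so valid_domains is all keys.)
def assign_domains_to_chunks_alt (top_keywords_per_chunk : List (List String)) (domain_keywords : List (String × List String)) : List String :=
  let d := PySem.Dict.ofList domain_keywords
  let index : PySem.Dict String (List String) :=
    d.items.foldl (fun ix p =>
      (PySem.List.dedup p.2).foldl (fun ix w => ix.modify w [] (fun l => l ++ [p.1])) ix)
      PySem.Dict.empty
  let valid_domains := d.keys
  top_keywords_per_chunk.foldl (fun chunk_domains chunk_keywords =>
    if valid_domains.isEmpty then chunk_domains ++ ["general"]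
    else
      let scores0 : PySem.Dict String Int :=
        valid_domains.foldl (fun s k => s.insert k (0 : Int)) PySem.Dict.empty
      let domain_scores :=
        chunk_keywords.foldl (fun s w =>
          (index.getD w []).foldl (fun s dom => s.modify dom 0 (· + 1)) s) scores0
      match PySem.List.max? domain_scores.keys (fun k => domain_scores.getD k 0) with
      | none => chunk_domains ++ ["general"]  -- unreachable: guarded by the isEmpty check
      | some best =>
        if domain_scores.getD best 0 > (0 : Int) then chunk_domains ++ [best]
        else chunk_domains ++ ["general"]) []

-- ===== PRECONDITION & SPEC =====
def Spec_assign_domains_to_chunks (top_keywords_per_chunk : List (List String)) (domain_keywords : List (String × List String)) (out : List String) : Prop := out = assign_domains_to_chunks_alt top_keywords_per_chunk domain_keywords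
instance (top_keywords_per_chunk : List (List String)) (domain_keywords : List (String × List String)) (out : List String) : Decidable (Spec_assign_domains_to_chunks top_keywords_per_chunk domain_keywords out) := by unfold Spec_assign_domains_to_chunks; infer_instance

-- ===== CLAIM (what is proved, stated in full; the proofs are below) =====
def Claim_equal_assign_domains_to_chunks : Prop := ∀ (top_keywords_per_chunk : List (List String)) (domain_keywords : List (String × List String)), Dom_assign_domains_to_chunks top_keywords_per_chunk domain_keywords → Spec_assign_domains_to_chunks top_keywords_per_chunk domain_keywords (assign_domains_to_chunks top_keywords_per_chunk domain_keywords)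


-- ===== LEMMAS AND PROOFS =====

-- The inverted-index fold flattened into a single fold over (keyword, domain) pairs.
lemma index_flatten (its : List (String × List String)) (e : PySem.Dict String (List String)) :
    its.foldl (fun ix p =>
      (PySem.List.dedup p.2).foldl (fun ix w => ix.modify w [] (fun l => l ++ [p.1])) ix) e
    = (its.flatMap (fun p => (PySem.List.dedup p.2).map (fun w => (w, p.1)))).foldl
        (fun ix q => ix.modify q.1 [] (fun l => l ++ [q.2])) e := by
  induction its generalizing e with
  | nil => rfl
  | cons p t ih =>
    simp only [List.foldl_cons, List.flatMap_cons, List.foldl_append, List.foldl_map]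
    exact ih _

lemma nodup_filter_beq (l : List String) (h : l.Nodup) (a : String) :
    l.filter (fun x => x == a) = if a ∈ l then [a] else [] := by
  induction l with
  | nil => simp
  | cons x t ih =>
    simp only [List.nodup_cons] at h
    by_cases hx : x = a
    · subst hx
      rw [List.filter_cons_of_pos (by simp)]
      rw [List.filter_eq_nil_iff.mpr (fun b hb => by
        simp only [beq_iff_eq]; rintro rfl; exact h.1 hb)]
      simp
    · rw [List.filter_cons_of_neg (by simp [hx]), ih h.2]
      by_cases ha : a ∈ t
      · simp [ha]
      · simp [ha, show ¬a = x from fun h' => hx h'.symm]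

-- What one bucket of the inverted index holds: the domains containing w, in order.
lemma index_bucket (its : List (String × List String)) (w : String) :
    ((its.foldl (fun ix p =>
        (PySem.List.dedup p.2).foldl (fun ix w => ix.modify w [] (fun l => l ++ [p.1])) ix)
        PySem.Dict.empty).getD w [])
    = (its.filter (fun p => decide (w ∈ p.2))).map Prod.fst := by
  rw [index_flatten, PySem.Dict.getD_foldl_modify_append]
  simp only [PySem.Dict.getD_empty, List.nil_append, List.filter_flatMap, List.filter_map]
  induction its with
  | nil => rfl
  | cons p t ih =>
    simp only [List.flatMap_cons, List.filter_cons, List.map_append, ih]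
    rw [show ((PySem.List.dedup p.2).filter ((fun q => q.1 == w) ∘ fun w' => (w', p.1)))
          = (PySem.List.dedup p.2).filter (fun x => x == w) from by rfl]
    rw [nodup_filter_beq _ (by simpa using PySem.List.nodup_dedup p.2) w]
    by_cases hw : w ∈ p.2 <;> simp [hw, PySem.List.mem_dedup]

-- Value of B's counting loop at any key.
lemma scoresB_getD (idx : PySem.Dict String (List String)) (chunk : List String)
    (s : PySem.Dict String Int) (dom : String) :
    (chunk.foldl (fun s w => (idx.getD w []).foldl (fun s d => s.modify d 0 (· + 1)) s) s).getD dom 0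
    = s.getD dom 0 + ((chunk.map (fun w => ((idx.getD w []).count dom : Int))).sum) := by
  induction chunk generalizing s with
  | nil => simp
  | cons w t ih =>
    simp only [List.foldl_cons, List.map_cons, List.sum_cons, ih,
      PySem.Dict.getD_foldl_modify_add_one]
    ring

-- Keys of B's counting loop are unchanged (every bucket element is already a key).
lemma scoresB_keys (idx : PySem.Dict String (List String)) (chunk : List String)
    (s : PySem.Dict String Int)
    (hsub : ∀ w, ∀ x ∈ idx.getD w [], x ∈ s.keys) :
    (chunk.foldl (fun s w => (idx.getD w []).foldl (fun s d => s.modify d 0 (· + 1)) s) s).keys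
    = s.keys := by
  induction chunk generalizing s with
  | nil => rfl
  | cons w t ih =>
    have hk : ((idx.getD w []).foldl (fun s d => s.modify d 0 (· + 1)) s).keys = s.keys := by
      rw [PySem.Dict.keys_foldl_modify, PySem.Set.update_eq_append_filter]
      have hnil : (PySem.Set.ofList (idx.getD w [])).filter
          (fun y => !(PySem.Set.contains s.keys y)) = [] := by
        apply List.filter_eq_nil_iff.mpr
        intro x hx
        have hx' : x ∈ idx.getD w [] := by
          have := PySem.Set.mem_ofList (xs := idx.getD w []) (y := x)
          exact this.mp hx
        simp [PySem.Set.contains, hsub w x hx']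
      rw [hnil, List.append_nil]
    simp only [List.foldl_cons]
    rw [ih _ (fun w' x hx => by rw [hk]; exact hsub w' x hx), hk]

lemma count_bucket (its : List (String × List String)) (hnd : (its.map Prod.fst).Nodup)
    (dom : String) (kws : List String) (hmem : (dom, kws) ∈ its) (w : String) :
    (((its.filter (fun p => decide (w ∈ p.2))).map Prod.fst).count dom)
    = if w ∈ kws then 1 else 0 := by
  have hsub : List.Sublist ((its.filter (fun p => decide (w ∈ p.2))).map Prod.fst)
      (its.map Prod.fst) :=
    List.Sublist.map Prod.fst List.filter_sublist
  have hnd' := hsub.nodup hnd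
  by_cases hw : w ∈ kws
  · rw [if_pos hw]
    exact List.count_eq_one_of_mem hnd'
      (List.mem_map.mpr ⟨(dom, kws), List.mem_filter.mpr ⟨hmem, by simpa using hw⟩, rfl⟩)
  · rw [if_neg hw, List.count_eq_zero]
    intro hdom
    obtain ⟨p, hp, hpd⟩ := List.mem_map.mp hdom
    have hp' := List.mem_filter.mp hp
    have hpe : p = (dom, kws) :=
      List.inj_on_of_nodup_map hnd hp'.1 hmem
        (show Prod.fst p = Prod.fst (dom, kws) from hpd)
    rw [hpe] at hp'
    exact hw (by simpa using hp'.2)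

-- A's per-chunk score dict equals B's per-chunk counter dict.
lemma scores_eq (its : List (String × List String)) (hnd : (its.map Prod.fst).Nodup)
    (chunk : List String) :
    its.foldl (fun s p =>
        s.insert p.1 (chunk.foldl (fun o w => if w ∈ p.2 then o + 1 else o) 0))
      PySem.Dict.empty
    = chunk.foldl (fun s w =>
        (((its.foldl (fun ix p =>
            (PySem.List.dedup p.2).foldl (fun ix w => ix.modify w [] (fun l => l ++ [p.1])) ix)
            PySem.Dict.empty).getD w [])).foldl (fun s dom => s.modify dom 0 (· + 1)) s)
        ((its.map Prod.fst).foldl (fun s k => s.insert k (0 : Int)) PySem.Dict.empty) := by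
  have hA := PySem.Dict.items_foldl_insert_fresh
    (d := (PySem.Dict.empty : PySem.Dict String Int)) (l := its) (k := Prod.fst)
    (v := fun p => chunk.foldl (fun o w => if w ∈ p.2 then o + 1 else o) 0)
    (by intro a _; rfl) hnd
  have h0 := PySem.Dict.items_foldl_insert_fresh
    (d := (PySem.Dict.empty : PySem.Dict String Int)) (l := its.map Prod.fst) (k := fun x => x)
    (v := fun _ => (0 : Int)) (by intro a _; rfl) (by simpa using hnd)
  rw [show (PySem.Dict.empty : PySem.Dict String Int).items = [] from rfl, List.nil_append] at hA
  rw [show (PySem.Dict.empty : PySem.Dict String Int).items = [] from rfl, List.nil_append] at h0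
  set idx := its.foldl (fun ix p =>
      (PySem.List.dedup p.2).foldl (fun ix w => ix.modify w [] (fun l => l ++ [p.1])) ix)
      PySem.Dict.empty with hidx
  set s0 := (its.map Prod.fst).foldl (fun s k => s.insert k (0 : Int)) PySem.Dict.empty with hs0
  have hs0keys : s0.keys = its.map Prod.fst := by
    show s0.items.map Prod.fst = _
    rw [h0]; simp
  have hs0getD : ∀ k ∈ its.map Prod.fst, s0.getD k 0 = 0 := by
    intro k hk
    have hmem : (k, (0 : Int)) ∈ s0.items := by
      rw [h0]; exact List.mem_map.mpr ⟨k, hk, rfl⟩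
    have hnds0 : s0.keys.Nodup := by rw [hs0keys]; simpa using hnd
    exact PySem.Dict.getD_of_mem_items _ hmem hnds0 0
  have hbucket : ∀ w, ∀ x ∈ idx.getD w [], x ∈ s0.keys := by
    intro w x hx
    rw [hidx, index_bucket] at hx
    rw [hs0keys]
    exact (List.Sublist.map Prod.fst List.filter_sublist).subset hx
  have hkeysB := scoresB_keys idx chunk s0 hbucket
  apply PySem.Dict.ext
  rw [hA]
  rw [PySem.Dict.items_eq_map_keys _ (by rw [hkeysB, hs0keys]; simpa using hnd) 0,
    hkeysB, hs0keys, List.map_map]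
  apply List.map_congr_left
  intro p hp
  simp only [Function.comp_apply]
  congr 1
  rw [scoresB_getD, hs0getD p.1 (List.mem_map.mpr ⟨p, hp, rfl⟩), zero_add]
  have : ∀ w, ((idx.getD w []).count p.1 : Int) = if w ∈ p.2 then 1 else 0 := by
    intro w
    rw [hidx, index_bucket, count_bucket its hnd p.1 p.2 hp w]
    split_ifs <;> rfl
  simp only [this]
  rw [PySem.List.foldl_ite_add_one, zero_add,
    ← PySem.List.sum_map_ite_one_zero (fun x => decide (x ∈ p.2))]
  simp

-- A's overlap count is nonnegative.
lemma ovl_nonneg (chunk kws : List String) :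
    0 ≤ chunk.foldl (fun o w => if w ∈ kws then o + 1 else o) (0 : Int) := by
  rw [PySem.List.foldl_ite_add_one, zero_add]
  positivity

-- Per-chunk agreement of the two branch bodies (stated let-free so it can be rewritten).
lemma chunk_step (its : List (String × List String)) (hnd : (its.map Prod.fst).Nodup)
    (acc chunk : List String) :
    (if (its.foldl (fun s p =>
          s.insert p.1 (chunk.foldl (fun o w => if w ∈ p.2 then o + 1 else o) 0))
          (PySem.Dict.empty : PySem.Dict String Int)).items.isEmpty then acc ++ ["general"]
     else
       match PySem.List.max? (its.foldl (fun s p =>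
            s.insert p.1 (chunk.foldl (fun o w => if w ∈ p.2 then o + 1 else o) 0))
            (PySem.Dict.empty : PySem.Dict String Int)).keys
          (fun k => ((its.foldl (fun s p =>
            s.insert p.1 (chunk.foldl (fun o w => if w ∈ p.2 then o + 1 else o) 0))
            (PySem.Dict.empty : PySem.Dict String Int)).getD k 0)) with
       | none => acc ++ ["general"]
       | some best =>
         if ((its.foldl (fun s p =>
              s.insert p.1 (chunk.foldl (fun o w => if w ∈ p.2 then o + 1 else o) 0))
              (PySem.Dict.empty : PySem.Dict String Int)).getD best 0) = 0 then
           acc ++ ["general"]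
         else acc ++ [best])
    = (if (its.map Prod.fst).isEmpty then acc ++ ["general"]
       else
         match PySem.List.max? (chunk.foldl (fun s w =>
              (((its.foldl (fun ix p =>
                  (PySem.List.dedup p.2).foldl (fun ix w => ix.modify w [] (fun l => l ++ [p.1])) ix)
                  PySem.Dict.empty).getD w [])).foldl (fun s dom => s.modify dom 0 (· + 1)) s)
              ((its.map Prod.fst).foldl (fun s k => s.insert k (0 : Int)) PySem.Dict.empty)).keys
            (fun k => ((chunk.foldl (fun s w =>
              (((its.foldl (fun ix p =>
                  (PySem.List.dedup p.2).foldl (fun ix w => ix.modify w [] (fun l => l ++ [p.1])) ix)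
                  PySem.Dict.empty).getD w [])).foldl (fun s dom => s.modify dom 0 (· + 1)) s)
              ((its.map Prod.fst).foldl (fun s k => s.insert k (0 : Int)) PySem.Dict.empty)).getD k 0)) with
         | none => acc ++ ["general"]
         | some best =>
           if ((chunk.foldl (fun s w =>
              (((its.foldl (fun ix p =>
                  (PySem.List.dedup p.2).foldl (fun ix w => ix.modify w [] (fun l => l ++ [p.1])) ix)
                  PySem.Dict.empty).getD w [])).foldl (fun s dom => s.modify dom 0 (· + 1)) s)
              ((its.map Prod.fst).foldl (fun s k => s.insert k (0 : Int)) PySem.Dict.empty)).getD best 0) > (0 : Int) then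
             acc ++ [best]
           else acc ++ ["general"]) := by
  rw [← scores_eq its hnd chunk]
  set scores := its.foldl (fun s p =>
      s.insert p.1 (chunk.foldl (fun o w => if w ∈ p.2 then o + 1 else o) 0))
    (PySem.Dict.empty : PySem.Dict String Int) with hs
  have hitems : scores.items = its.map
      (fun p => (p.1, chunk.foldl (fun o w => if w ∈ p.2 then o + 1 else o) 0)) := by
    have := PySem.Dict.items_foldl_insert_fresh
      (d := (PySem.Dict.empty : PySem.Dict String Int)) (l := its) (k := Prod.fst)
      (v := fun p => chunk.foldl (fun o w => if w ∈ p.2 then o + 1 else o) 0)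
      (by intro a _; rfl) hnd
    simpa using this
  have hempty : scores.items.isEmpty = (its.map Prod.fst).isEmpty := by
    rw [hitems]; cases its <;> rfl
  rw [hempty]
  by_cases he : (its.map Prod.fst).isEmpty
  · rw [if_pos he, if_pos he]
  · rw [if_neg he, if_neg he]
    cases hmax : PySem.List.max? scores.keys (fun k => scores.getD k 0) with
    | none => rfl
    | some best =>
      show (if scores.getD best 0 = 0 then acc ++ ["general"] else acc ++ [best])
          = (if scores.getD best 0 > (0 : Int) then acc ++ [best] else acc ++ ["general"])
      have hbestmem : best ∈ scores.keys := PySem.List.max?_mem hmax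
      have hkeys2 : scores.keys = its.map Prod.fst := by
        show scores.items.map Prod.fst = _
        rw [hitems]; simp
      have hnn : 0 ≤ scores.getD best 0 := by
        rw [hkeys2] at hbestmem
        obtain ⟨p, hp, hpb⟩ := List.mem_map.mp hbestmem
        have : scores.getD best 0
            = chunk.foldl (fun o w => if w ∈ p.2 then o + 1 else o) 0 := by
          apply PySem.Dict.getD_of_mem_items
          · rw [hitems]; exact List.mem_map.mpr ⟨p, hp, by rw [hpb]⟩
          · show (scores.items.map Prod.fst).Nodup
            rw [hitems, List.map_map]
            simpa using hnd
        rw [this]; exact ovl_nonneg chunk p.2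
      by_cases hz : scores.getD best 0 = 0
      · rw [if_pos hz, if_neg (by omega)]
      · rw [if_neg hz, if_pos (by omega)]

-- ===== VERDICT (by name: the statement is the Claim_ definition above) =====
theorem assign_domains_to_chunks_spec : Claim_equal_assign_domains_to_chunks := by
  intro tk dk _
  unfold Spec_assign_domains_to_chunks assign_domains_to_chunks assign_domains_to_chunks_alt
  have hnd : ((PySem.Dict.ofList dk).items.map Prod.fst).Nodup :=
    PySem.Dict.nodup_keys_ofList dk
  apply List.foldl_ext
  intro acc chunk _
  exact chunk_step (PySem.Dict.ofList dk).items hnd acc chunk
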